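-- pv_equiv track=rewrite | github.com/Nomisodan/Home-Bar-Inventory | project.py | get_global_inventory
-- ===== SOURCE A (Python) =====
-- def get_global_inventory(inventory):
--     global_totals = {}
--     for location in inventory:
--         for item, qty in inventory[location].items():
--             if item in global_totals:
--                 global_totals[item] += qty
--             else:
--                 global_totals[item] = qty
--     return global_totals
-- ===== SOURCE B (Python) =====
-- def get_global_inventory(inventory):
--     # Gather the distinct item keys (first-occurrence order), then build the
--     # result by summing each item's quantity across all locations with .get(item, 0).
--     keys = dict.fromkeys(item for items in inventory.values() for item in items)
--     return {item: sum(items.get(item, 0) for items in inventory.values())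
--             for item in keys}
-- ===== Notes on version B (the rewrite author's own statement) =====
-- stated objective: simpler
-- what changed: A makes one accumulating pass updating a running totals dict; B instead first gathers the distinct item keys with dict.fromkeys and then, per key, rescans every location summing items.get(key, 0) in a comprehension.
import Mathlib
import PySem

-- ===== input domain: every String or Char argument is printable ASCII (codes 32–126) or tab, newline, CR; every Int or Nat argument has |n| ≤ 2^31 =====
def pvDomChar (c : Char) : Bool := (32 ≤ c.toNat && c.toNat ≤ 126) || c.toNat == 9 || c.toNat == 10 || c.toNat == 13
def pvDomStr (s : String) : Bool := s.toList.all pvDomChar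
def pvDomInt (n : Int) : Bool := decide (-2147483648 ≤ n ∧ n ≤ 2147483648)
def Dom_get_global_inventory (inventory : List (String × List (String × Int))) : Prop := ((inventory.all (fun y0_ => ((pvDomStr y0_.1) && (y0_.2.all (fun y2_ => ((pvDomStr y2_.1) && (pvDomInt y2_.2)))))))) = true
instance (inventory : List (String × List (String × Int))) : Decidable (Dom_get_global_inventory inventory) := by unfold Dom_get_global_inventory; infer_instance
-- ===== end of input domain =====

-- B replaces A's single accumulating pass by gather-distinct-keys-then-per-key-rescan
-- (a simpler two-step decomposition; no speed claim). Equivalence of the RETURN value is proved on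
-- inputs whose association lists have duplicate-free keys (i.e. those that represent Python dicts).

-- ===== PORT A =====
def get_global_inventory (inventory : List (String × List (String × Int))) : List (String × Int) :=
  (inventory.foldl
    (fun (gt : PySem.Dict String Int) loc =>
      -- for item, qty in inventory[location].items():
      ((inventory.lookup loc.1).getD []).foldl
        (fun gt iq =>
          if gt.contains iq.1 then gt.insert iq.1 (gt.getD iq.1 0 + iq.2)  -- global_totals[item] += qty
          else gt.insert iq.1 iq.2)                                        -- global_totals[item] = qty
        gt)
    PySem.Dict.empty).items

-- ===== PORT B =====
def get_global_inventory_alt (inventory : List (String × List (String × Int))) : List (String × Int) :=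
  -- keys = dict.fromkeys(item for items in inventory.values() for item in items)
  let keys : List String := PySem.List.dedup ((inventory.flatMap Prod.snd).map Prod.fst)
  keys.map (fun k => (k, (inventory.map (fun loc => ((loc.2.lookup k).getD 0))).sum))

-- ===== PRECONDITION & SPEC =====
-- Pre_ excludes association lists with duplicate keys (outer or inner): those do not represent
-- a Python dict, so A's behaviour on them is nobody's; Python A is never called on such inputs.
def Pre_get_global_inventory (inventory : List (String × List (String × Int))) : Prop :=
  (inventory.map Prod.fst).Nodup ∧ ∀ loc ∈ inventory, (loc.2.map Prod.fst).Nodup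
instance (inventory : List (String × List (String × Int))) : Decidable (Pre_get_global_inventory inventory) := by unfold Pre_get_global_inventory; infer_instance
def pvWitness_get_global_inventory : (List (String × List (String × Int))) :=
  [("bar", [("gin", 2), ("rum", 1)]), ("cellar", [("gin", 3)])]

def Spec_get_global_inventory (inventory : List (String × List (String × Int))) (out : List (String × Int)) : Prop := out = get_global_inventory_alt inventory
instance (inventory : List (String × List (String × Int))) (out : List (String × Int)) : Decidable (Spec_get_global_inventory inventory out) := by unfold Spec_get_global_inventory; infer_instance

-- ===== CLAIM (what is proved, stated in full; the proofs are below) =====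
def Claim_equal_get_global_inventory : Prop := ∀ (inventory : List (String × List (String × Int))), Dom_get_global_inventory inventory → Pre_get_global_inventory inventory → Spec_get_global_inventory inventory (get_global_inventory inventory)

-- ===== LEMMAS AND PROOFS =====

-- A's inner loop body, and the per-key quantity sum of a list of (item, qty) pairs.
def aStep (gt : PySem.Dict String Int) (iq : String × Int) : PySem.Dict String Int :=
  if gt.contains iq.1 then gt.insert iq.1 (gt.getD iq.1 0 + iq.2) else gt.insert iq.1 iq.2

def sumKey (l : List (String × Int)) (k : String) : Int :=
  (l.map (fun q => if q.1 = k then q.2 else 0)).sum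

theorem aStep_eq_insert : aStep = fun gt iq =>
    gt.insert iq.1 (if gt.contains iq.1 then gt.getD iq.1 0 + iq.2 else iq.2) := by
  funext gt iq
  by_cases h : gt.contains iq.1 <;> simp [aStep, h]

theorem getD_aStep (gt : PySem.Dict String Int) (iq : String × Int) (k : String) :
    (aStep gt iq).getD k 0 = gt.getD k 0 + (if iq.1 = k then iq.2 else 0) := by
  rw [aStep_eq_insert]
  simp only [PySem.Dict.getD_insert]
  by_cases h : k = iq.1
  · rw [if_pos h, if_pos h.symm, h]
    by_cases hc : gt.contains iq.1
    · rw [if_pos hc]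
    · rw [if_neg hc, PySem.Dict.getD_of_not_contains gt 0 (by simpa using hc), zero_add]
  · rw [if_neg h, if_neg (fun e => h e.symm), add_zero]

theorem getD_foldl_aStep (ps : List (String × Int)) (gt : PySem.Dict String Int) (k : String) :
    (ps.foldl aStep gt).getD k 0 = gt.getD k 0 + sumKey ps k := by
  induction ps generalizing gt with
  | nil => simp [sumKey]
  | cons p t ih => simp [List.foldl_cons, ih, getD_aStep, sumKey, add_assoc]

theorem keys_foldl_aStep (ps : List (String × Int)) (gt : PySem.Dict String Int) :
    (ps.foldl aStep gt).keys = PySem.Set.update gt.keys (ps.map Prod.fst) := by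
  rw [aStep_eq_insert]
  exact PySem.Dict.keys_foldl_insert_key ps Prod.fst _ gt

theorem nodup_keys_foldl_aStep (ps : List (String × Int)) (gt : PySem.Dict String Int)
    (h : gt.keys.Nodup) : (ps.foldl aStep gt).keys.Nodup := by
  rw [aStep_eq_insert]
  exact PySem.Dict.nodup_keys_foldl_insert_key ps Prod.fst _ gt h

-- first-match lookup on a duplicate-free association list is the per-key sum
theorem lookup_getD_eq_sumKey (l : List (String × Int)) (k : String)
    (h : (l.map Prod.fst).Nodup) : ((l.lookup k).getD 0) = sumKey l k := by
  induction l with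
  | nil => simp [sumKey]
  | cons p t ih =>
      simp only [List.map_cons, List.nodup_cons] at h
      by_cases hk : p.1 = k
      · have hq : ∀ q ∈ t, (if q.1 = k then q.2 else (0:Int)) = (fun _ => (0:Int)) q := by
          intro q hq
          have : q.1 ≠ k := fun e => h.1 (by rw [hk, ← e]; exact List.mem_map_of_mem hq)
          simp [this]
        have hz : (t.map (fun q => if q.1 = k then q.2 else (0:Int))).sum = 0 := by
          rw [List.map_eq_map_iff.mpr hq]
          simp
        have hbeq : (k == p.1) = true := beq_iff_eq.mpr hk.symm
        simp [sumKey, List.lookup, hk, hz]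
      · have hbeq : (k == p.1) = false := beq_eq_false_iff_ne.mpr (fun e => hk e.symm)
        simp [sumKey, List.lookup, hbeq, ih h.2, hk]

theorem sumKey_append (l₁ l₂ : List (String × Int)) (k : String) :
    sumKey (l₁ ++ l₂) k = sumKey l₁ k + sumKey l₂ k := by
  simp [sumKey]

theorem sumKey_flatMap (inventory : List (String × List (String × Int))) (k : String) :
    sumKey (inventory.flatMap Prod.snd) k
      = (inventory.map (fun loc => sumKey loc.2 k)).sum := by
  induction inventory with
  | nil => simp [sumKey]
  | cons p t ih => rw [List.flatMap_cons, sumKey_append, ih, List.map_cons, List.sum_cons]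

-- under nodup outer keys, A's lookup of each location retrieves that location's own list
theorem lookup_self (inventory : List (String × List (String × Int)))
    (h : (inventory.map Prod.fst).Nodup) (loc : String × List (String × Int))
    (hm : loc ∈ inventory) : inventory.lookup loc.1 = some loc.2 := by
  induction inventory with
  | nil => cases hm
  | cons p t ih =>
      simp only [List.map_cons, List.nodup_cons] at h
      cases hm with
      | head => simp [List.lookup]
      | tail _ hm =>
          have hne : (loc.1 == p.1) = false :=
            beq_eq_false_iff_ne.mpr (fun e => h.1 (e ▸ List.mem_map_of_mem hm))
          simp [List.lookup, hne, ih h.2 hm]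

-- A's nested fold is the flat fold of aStep over all (item, qty) pairs
theorem afold_eq_flat (inventory : List (String × List (String × Int)))
    (h : (inventory.map Prod.fst).Nodup) (gt : PySem.Dict String Int) :
    inventory.foldl (fun gt loc => ((inventory.lookup loc.1).getD []).foldl aStep gt) gt
      = (inventory.flatMap Prod.snd).foldl aStep gt := by
  have h1 : inventory.foldl (fun gt loc => ((inventory.lookup loc.1).getD []).foldl aStep gt) gt
      = inventory.foldl (fun gt loc => loc.2.foldl aStep gt) gt :=
    PySem.List.foldl_congr_mem inventory _ _ gt
      (fun acc x hx => by rw [lookup_self inventory h x hx, Option.getD_some])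
  rw [h1, List.foldl_flatMap]

-- ===== VERDICT (by name: the statement is the Claim_ definition above) =====
theorem get_global_inventory_spec : Claim_equal_get_global_inventory := by
  intro inventory _ hpre
  obtain ⟨houter, hinner⟩ := hpre
  unfold Spec_get_global_inventory get_global_inventory get_global_inventory_alt
  rw [show (fun (gt : PySem.Dict String Int) (iq : String × Int) =>
        if gt.contains iq.1 then gt.insert iq.1 (gt.getD iq.1 0 + iq.2)
        else gt.insert iq.1 iq.2) = aStep from rfl]
  rw [afold_eq_flat inventory houter PySem.Dict.empty]
  have hnd : (((inventory.flatMap Prod.snd).foldl aStep PySem.Dict.empty)).keys.Nodup :=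
    nodup_keys_foldl_aStep _ _ (by simp)
  rw [PySem.Dict.items_eq_map_keys _ hnd 0, keys_foldl_aStep]
  have hbkeys : PySem.List.dedup ((inventory.flatMap Prod.snd).map Prod.fst)
      = PySem.Set.update (PySem.Dict.empty : PySem.Dict String Int).keys
          ((inventory.flatMap Prod.snd).map Prod.fst) := by
    rw [PySem.List.dedup_eq_ofList]
    rfl
  rw [hbkeys]
  apply List.map_congr_left
  intro k _
  rw [getD_foldl_aStep]
  have hv : ∀ loc ∈ inventory, ((loc.2.lookup k).getD 0) = sumKey loc.2 k :=
    fun loc hm => lookup_getD_eq_sumKey loc.2 k (hinner loc hm)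
  rw [List.map_congr_left hv, ← sumKey_flatMap]
  simp
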